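-- pv_equiv track=rewrite | github.com/MiTo0o/connected-devices-game-hub | type_game.py | check_key_press
-- ===== SOURCE A (Python) =====
-- screen_width = 240
--
-- screen_height = 320
--
-- keys = [
--     "QWERTYUIOP",
--     "ASDFGHJKL",
--     "ZXCVBNM",
--     "__SPACE____DEL__"
-- ]
--
-- def check_key_press(x, y, key_positions, key_size, key_margin):
--     start_y = screen_height - (len(keys) * (key_size[1] + key_margin) - key_margin)
--     for j, row in enumerate(keys):
--         start_x = (screen_width - (len(row) * (key_size[0] + key_margin) - key_margin)) // 2
--         for i, key in enumerate(row):
--             key_x, key_y = start_x + i * (key_size[0] + key_margin), start_y + j * (key_size[1] + key_margin)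
--             if key in ['__SPACE__', '__DEL__']:
--                 special_key_size = (key_size[0] * 5 if key == '__SPACE__' else key_size[0] * 2, key_size[1])
--                 if key_x <= x < key_x + special_key_size[0] and key_y <= y < key_y + special_key_size[1]:
--                     return key
--                 if key == '__SPACE__':
--                     i += 4  # Increment index for the large space key
--                 elif key == '__DEL__':
--                     i += 1  # Increment index for the delete key
--             elif key_x <= x < key_x + key_size[0] and key_y <= y < key_y + key_size[1]:
--                 return key
--     return None
-- ===== SOURCE B (Python) =====
-- screen_width = 240
--
-- screen_height = 320
--
-- keys = [
--     "QWERTYUIOP",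
--     "ASDFGHJKL",
--     "ZXCVBNM",
--     "__SPACE____DEL__"
-- ]
--
-- def _cell_range(d, size, step, n):
--     """Indices i in [0, n) whose cell [i*step, i*step + size) contains d.
--
--     The matching indices always form one contiguous run, computed here by
--     floor-division arithmetic (all divisors kept positive)."""
--     if size <= 0:
--         return range(0)
--     if step > 0:
--         lo, hi = (d - size) // step + 1, d // step
--     elif step < 0:
--         lo, hi = -(d // -step), -((d - size) // -step) - 1
--     else:
--         lo, hi = (0, n - 1) if 0 <= d < size else (0, -1)
--     return range(max(lo, 0), min(hi, n - 1) + 1)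
--
-- def check_key_press(x, y, key_positions, key_size, key_margin):
--     start_y = screen_height - (len(keys) * (key_size[1] + key_margin) - key_margin)
--     for j in _cell_range(y - start_y, key_size[1], key_size[1] + key_margin, len(keys)):
--         row = keys[j]
--         start_x = (screen_width - (len(row) * (key_size[0] + key_margin) - key_margin)) // 2
--         for i in _cell_range(x - start_x, key_size[0], key_size[0] + key_margin, len(row)):
--             return row[i]
--     return None
-- ===== Notes on version B (the rewrite author's own statement) =====
-- stated objective: alternative
-- what changed: B replaces A's nested scan over every key of every row by closed-form floor-division arithmetic that computes the contiguous run of grid cells containing the point directly (handling overlapping cells from negative margins), visiting only the vertically matching rows.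
import Mathlib
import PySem

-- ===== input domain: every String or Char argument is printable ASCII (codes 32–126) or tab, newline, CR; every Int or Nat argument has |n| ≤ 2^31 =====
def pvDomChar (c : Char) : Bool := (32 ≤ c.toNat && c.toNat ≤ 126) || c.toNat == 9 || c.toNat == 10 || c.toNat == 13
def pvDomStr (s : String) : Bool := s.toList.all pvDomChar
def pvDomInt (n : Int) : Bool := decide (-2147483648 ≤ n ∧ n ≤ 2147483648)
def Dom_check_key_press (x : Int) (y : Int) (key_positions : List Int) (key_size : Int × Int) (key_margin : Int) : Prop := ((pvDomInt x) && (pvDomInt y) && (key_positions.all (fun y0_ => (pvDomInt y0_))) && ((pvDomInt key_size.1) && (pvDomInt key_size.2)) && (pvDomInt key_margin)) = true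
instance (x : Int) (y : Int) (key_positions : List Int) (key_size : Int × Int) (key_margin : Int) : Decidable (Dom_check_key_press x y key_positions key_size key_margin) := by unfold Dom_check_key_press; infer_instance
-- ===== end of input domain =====

-- B replaces A's scan over every key of every row by closed-form floor-division
-- cell arithmetic (alternative decomposition; same exact return value).

-- ===== PORT A =====
def pvKeys : List String := ["QWERTYUIOP", "ASDFGHJKL", "ZXCVBNM", "__SPACE____DEL__"]

-- inner loop 'for i, key in enumerate(row)' of A (key is a 1-character string)
def pvScanKeys (x y start_x key_y kw kh km : Int) : List (Int × Char) → Option String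
  | [] => none
  | (i, key) :: rest =>
    let key_x := start_x + i * (kw + km)
    if String.ofList [key] ∈ (["__SPACE__", "__DEL__"] : List String) then
      let special_key_size : Int × Int :=
        (if String.ofList [key] = "__SPACE__" then kw * 5 else kw * 2, kh)
      if key_x ≤ x ∧ x < key_x + special_key_size.1 ∧ key_y ≤ y ∧ y < key_y + special_key_size.2 then
        some (String.ofList [key])
      else
        -- Python then rebinds the loop variable i (`i += 4` / `i += 1`), which has
        -- no effect on the iteration; nothing to port
        pvScanKeys x y start_x key_y kw kh km rest
    else if key_x ≤ x ∧ x < key_x + kw ∧ key_y ≤ y ∧ y < key_y + kh then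
      some (String.ofList [key])
    else
      pvScanKeys x y start_x key_y kw kh km rest

-- outer loop 'for j, row in enumerate(keys)' of A
def pvScanRows (x y start_y kw kh km : Int) : List (Int × String) → Option String
  | [] => none
  | (j, row) :: rest =>
    let start_x := PySem.Int.floordiv (240 - (PySem.Str.len row * (kw + km) - km)) 2
    let key_y := start_y + j * (kh + km)
    match pvScanKeys x y start_x key_y kw kh km (PySem.List.enumerate row.toList) with
    | some k => some k
    | none => pvScanRows x y start_y kw kh km rest

def check_key_press (x : Int) (y : Int) (key_positions : List Int) (key_size : Int × Int) (key_margin : Int) : Option String :=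
  let start_y := 320 - (PySem.List.len pvKeys * (key_size.2 + key_margin) - key_margin)
  pvScanRows x y start_y key_size.1 key_size.2 key_margin (PySem.List.enumerate pvKeys)

-- ===== PORT B =====
-- Source B _cell_range: the contiguous run of i in [0, n) with i*step ≤ d < i*step + size
def pvCellRange (d size step n : Int) : List Int :=
  if size ≤ 0 then []
  else
    let lohi : Int × Int :=
      if step > 0 then
        (PySem.Int.floordiv (d - size) step + 1, PySem.Int.floordiv d step)
      else if step < 0 then
        (-(PySem.Int.floordiv d (-step)), -(PySem.Int.floordiv (d - size) (-step)) - 1)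
      else if 0 ≤ d ∧ d < size then (0, n - 1) else (0, -1)
    PySem.List.pyRange (max lohi.1 0) (min lohi.2 (n - 1) + 1) 1

-- body of Source B's outer loop for one row index j (the inner 'for i in …: return row[i]')
def pvRowHit (x kw km : Int) (row : String) : Option String :=
  let start_x := PySem.Int.floordiv (240 - (PySem.Str.len row * (kw + km) - km)) 2
  match pvCellRange (x - start_x) kw (kw + km) (PySem.Str.len row) with
  | [] => none
  | i :: _ =>
    match PySem.List.pyGet? row.toList i with
    | none => none   -- unreachable: i lies in [0, len row) by construction
    | some c => some (String.ofList [c])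

-- Source B's outer loop over the vertically matching row indices
def pvAltRows (x y kw kh km : Int) : List Int → Option String
  | [] => none
  | j :: rest =>
    match PySem.List.pyGet? pvKeys j with
    | none => none   -- unreachable: j lies in [0, 4) by construction
    | some row =>
      match pvRowHit x kw km row with
      | some r => some r
      | none => pvAltRows x y kw kh km rest

def check_key_press_alt (x : Int) (y : Int) (key_positions : List Int) (key_size : Int × Int) (key_margin : Int) : Option String :=
  let start_y := 320 - (PySem.List.len pvKeys * (key_size.2 + key_margin) - key_margin)
  pvAltRows x y key_size.1 key_size.2 key_margin
    (pvCellRange (y - start_y) key_size.2 (key_size.2 + key_margin) (PySem.List.len pvKeys))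

-- ===== PRECONDITION & SPEC =====
def Spec_check_key_press (x : Int) (y : Int) (key_positions : List Int) (key_size : Int × Int) (key_margin : Int) (out : Option String) : Prop := out = check_key_press_alt x y key_positions key_size key_margin
instance (x : Int) (y : Int) (key_positions : List Int) (key_size : Int × Int) (key_margin : Int) (out : Option String) : Decidable (Spec_check_key_press x y key_positions key_size key_margin out) := by unfold Spec_check_key_press; infer_instance

-- ===== CLAIM (what is proved, stated in full; the proofs are below) =====
def Claim_equal_check_key_press : Prop := ∀ (x : Int) (y : Int) (key_positions : List Int) (key_size : Int × Int) (key_margin : Int), Dom_check_key_press x y key_positions key_size key_margin → Spec_check_key_press x y key_positions key_size key_margin (check_key_press x y key_positions key_size key_margin)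


-- ===== LEMMAS AND PROOFS =====

-- membership in pvCellRange is exactly the cell condition
theorem pvCellRange_mem (d size step n i : Int) :
    i ∈ pvCellRange d size step n ↔ (0 ≤ i ∧ i < n ∧ i * step ≤ d ∧ d < i * step + size) := by
  unfold pvCellRange
  by_cases hsz : size ≤ 0
  · simp only [if_pos hsz, List.not_mem_nil, false_iff]
    rintro ⟨h1, h2, h3, h4⟩
    linarith
  · rw [if_neg hsz]
    by_cases hpos : step > 0
    · simp only [if_pos hpos]
      rw [PySem.List.mem_pyRange_one]
      have h1 : i ≤ PySem.Int.floordiv d step ↔ i * step ≤ d :=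
        PySem.Int.le_floordiv_iff_mul_le hpos
      have h2 : i ≤ PySem.Int.floordiv (d - size) step ↔ i * step ≤ d - size :=
        PySem.Int.le_floordiv_iff_mul_le hpos
      generalize i * step = t at h1 h2 ⊢
      omega
    · rw [if_neg hpos]
      by_cases hneg : step < 0
      · simp only [if_pos hneg]
        rw [PySem.List.mem_pyRange_one]
        have hpos' : (0 : Int) < -step := by omega
        have h1 : -i ≤ PySem.Int.floordiv d (-step) ↔ -i * -step ≤ d :=
          PySem.Int.le_floordiv_iff_mul_le hpos'
        have h2 : -i ≤ PySem.Int.floordiv (d - size) (-step) ↔ -i * -step ≤ d - size :=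
          PySem.Int.le_floordiv_iff_mul_le hpos'
        have e : -i * -step = i * step := by ring
        rw [e] at h1 h2
        generalize i * step = t at h1 h2 ⊢
        omega
      · have h0 : step = 0 := by omega
        subst h0
        rw [if_neg hneg]
        by_cases hd : 0 ≤ d ∧ d < size
        · simp only [if_pos hd]
          rw [PySem.List.mem_pyRange_one]
          simp only [mul_zero]
          omega
        · simp only [if_neg hd]
          rw [PySem.List.mem_pyRange_one]
          simp only [mul_zero]
          omega

theorem pvCellRange_pairwise (d size step n : Int) :
    (pvCellRange d size step n).Pairwise (· < ·) := by
  unfold pvCellRange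
  split_ifs <;> first
    | exact List.Pairwise.nil
    | exact PySem.List.pairwise_lt_pyRange_one _ _

-- first hit of a predicate while scanning a row left to right from index s
def pvFirstKey (P : Int → Prop) [DecidablePred P] : Int → List Char → Option (Int × Char)
  | _, [] => none
  | s, c :: cs => if P s then some (s, c) else pvFirstKey P (s + 1) cs

theorem pvFirstKey_congr (P Q : Int → Prop) [DecidablePred P] [DecidablePred Q]
    (hpq : ∀ i, P i ↔ Q i) :
    ∀ (row : List Char) (s : Int), pvFirstKey P s row = pvFirstKey Q s row := by
  intro row
  induction row with
  | nil => intro s; rfl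
  | cons c cs ih =>
    intro s
    simp only [pvFirstKey]
    by_cases hp : P s
    · rw [if_pos hp, if_pos ((hpq s).mp hp)]
    · rw [if_neg hp, if_neg (fun hq => hp ((hpq s).mpr hq)), ih]

theorem pvFirstKey_none (P : Int → Prop) [DecidablePred P] :
    ∀ (row : List Char) (s : Int), (∀ k, s ≤ k → k < s + row.length → ¬ P k) →
      pvFirstKey P s row = none := by
  intro row
  induction row with
  | nil => intro s _; rfl
  | cons c cs ih =>
    intro s h
    simp only [pvFirstKey]
    rw [if_neg (h s le_rfl (by simp))]
    refine ih (s + 1) (fun k hk1 hk2 => h k (by omega) ?_)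
    simp only [List.length_cons] at hk2 ⊢
    push_cast at hk2 ⊢
    omega

theorem pvFirstKey_some (P : Int → Prop) [DecidablePred P] :
    ∀ (row : List Char) (s i : Int), s ≤ i → i < s + row.length → P i →
      (∀ k, s ≤ k → k < i → ¬ P k) →
      pvFirstKey P s row = (row[(i - s).toNat]?).map (fun c => (i, c)) := by
  intro row
  induction row with
  | nil =>
    intro s i hsi hlt _ _
    simp only [List.length_nil, Nat.cast_zero, add_zero] at hlt
    omega
  | cons c cs ih =>
    intro s i hsi hlt hP hmin
    simp only [pvFirstKey]
    by_cases h : P s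
    · have hie : i = s := by
        by_contra hne
        exact hmin s le_rfl (by omega) h
      subst hie
      rw [if_pos h]
      simp
    · rw [if_neg h]
      have hne : s ≠ i := fun e => h (e ▸ hP)
      rw [ih (s + 1) i (by omega)
        (by simp only [List.length_cons] at hlt ⊢; push_cast at hlt ⊢; omega) hP
        (fun k hk1 hk2 => hmin k (by omega) hk2)]
      have e : (i - s).toNat = (i - (s + 1)).toNat + 1 := by omega
      rw [e, List.getElem?_cons_succ]

theorem pvScanKeys_eq_firstKey (x y start_x key_y kw kh km : Int) :
    ∀ (row : List Char), (∀ c ∈ row, String.ofList [c] ∉ (["__SPACE__", "__DEL__"] : List String)) →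
    ∀ s : Int,
      pvScanKeys x y start_x key_y kw kh km (PySem.List.enumerate row s) =
        (pvFirstKey (fun i => start_x + i * (kw + km) ≤ x ∧ x < start_x + i * (kw + km) + kw ∧
            key_y ≤ y ∧ y < key_y + kh) s row).map (fun p => String.ofList [p.2]) := by
  intro row
  induction row with
  | nil =>
    intro _ s
    simp [PySem.List.enumerate, pvScanKeys, pvFirstKey]
  | cons c cs ih =>
    intro h s
    rw [PySem.List.enumerate_cons]
    have hspec : String.ofList [c] ∉ (["__SPACE__", "__DEL__"] : List String) :=
      h c (List.mem_cons_self ..)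
    simp only [pvScanKeys, pvFirstKey]
    rw [if_neg hspec]
    by_cases hp : start_x + s * (kw + km) ≤ x ∧ x < start_x + s * (kw + km) + kw ∧
        key_y ≤ y ∧ y < key_y + kh
    · rw [if_pos hp, if_pos hp]
      rfl
    · rw [if_neg hp, if_neg hp]
      exact ih (fun c' hc' => h c' (List.mem_cons_of_mem _ hc')) (s + 1)

theorem pvRowHit_eq (x kw km : Int) (row : String) :
    pvRowHit x kw km row =
      (pvFirstKey (fun i =>
          PySem.Int.floordiv (240 - (PySem.Str.len row * (kw + km) - km)) 2 + i * (kw + km) ≤ x ∧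
          x < PySem.Int.floordiv (240 - (PySem.Str.len row * (kw + km) - km)) 2 + i * (kw + km) + kw)
        0 row.toList).map (fun p => String.ofList [p.2]) := by
  have hlen : PySem.Str.len row = (row.toList.length : Int) := PySem.Str.len_eq row
  cases hcr : pvCellRange (x - PySem.Int.floordiv (240 - (PySem.Str.len row * (kw + km) - km)) 2)
      kw (kw + km) (PySem.Str.len row) with
  | nil =>
    simp only [pvRowHit, hcr]
    rw [pvFirstKey_none]
    · rfl
    · intro k hk0 hklt hPk
      have hmem : k ∈ pvCellRange
          (x - PySem.Int.floordiv (240 - (PySem.Str.len row * (kw + km) - km)) 2)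
          kw (kw + km) (PySem.Str.len row) := by
        rw [pvCellRange_mem]
        refine ⟨hk0, by omega, by linarith [hPk.1], by linarith [hPk.2]⟩
      rw [hcr] at hmem
      exact absurd hmem List.not_mem_nil
  | cons i rest =>
    have hmem : i ∈ pvCellRange
        (x - PySem.Int.floordiv (240 - (PySem.Str.len row * (kw + km) - km)) 2)
        kw (kw + km) (PySem.Str.len row) := by
      rw [hcr]; exact List.mem_cons_self ..
    rw [pvCellRange_mem] at hmem
    obtain ⟨hi0, hin, hil, hir⟩ := hmem
    have hpw := pvCellRange_pairwise
      (x - PySem.Int.floordiv (240 - (PySem.Str.len row * (kw + km) - km)) 2)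
      kw (kw + km) (PySem.Str.len row)
    rw [hcr, List.pairwise_cons] at hpw
    have hlt' : i.toNat < row.toList.length := by omega
    have hg : PySem.List.pyGet? row.toList i = row.toList[i.toNat]? := by
      have hnat : i = ((i.toNat : Nat) : Int) := by omega
      conv_lhs => rw [hnat]
      rw [PySem.List.pyGet?_natCast]
    simp only [pvRowHit, hcr, hg, List.getElem?_eq_getElem hlt']
    rw [pvFirstKey_some _ row.toList 0 i hi0 (by omega) ⟨by linarith, by linarith⟩ ?_]
    · rw [show (i - 0 : Int) = i by ring, List.getElem?_eq_getElem hlt']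
      rfl
    · intro k hk0 hki hPk
      have hkmem : k ∈ pvCellRange
          (x - PySem.Int.floordiv (240 - (PySem.Str.len row * (kw + km) - km)) 2)
          kw (kw + km) (PySem.Str.len row) := by
        rw [pvCellRange_mem]
        refine ⟨hk0, by omega, by linarith [hPk.1], by linarith [hPk.2]⟩
      rw [hcr, List.mem_cons] at hkmem
      rcases hkmem with e | hkr
      · omega
      · exact absurd (hpw.1 k hkr) (by omega)

-- two strictly increasing integer lists with the same members are equal
theorem pvSortedExt : ∀ (l1 l2 : List Int), l1.Pairwise (· < ·) → l2.Pairwise (· < ·) →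
    (∀ a, a ∈ l1 ↔ a ∈ l2) → l1 = l2 := by
  intro l1
  induction l1 with
  | nil =>
    intro l2 _ _ h
    cases l2 with
    | nil => rfl
    | cons b t => exact absurd ((h b).mpr (List.mem_cons_self ..)) List.not_mem_nil
  | cons a t ih =>
    intro l2 h1 h2 h
    cases l2 with
    | nil => exact absurd ((h a).mp (List.mem_cons_self ..)) List.not_mem_nil
    | cons b u =>
      rw [List.pairwise_cons] at h1 h2
      have hab : a = b := by
        have ha2 := (h a).mp (List.mem_cons_self ..)
        have hb1 := (h b).mpr (List.mem_cons_self ..)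
        rw [List.mem_cons] at ha2 hb1
        rcases ha2 with e | ha2'
        · exact e
        · rcases hb1 with e | hb1'
          · omega
          · have := h1.1 b hb1'
            have := h2.1 a ha2'
            omega
      subst hab
      have ht : t = u := by
        refine ih u h1.2 h2.2 (fun c => ⟨fun hc => ?_, fun hc => ?_⟩)
        · have hc2 := (h c).mp (List.mem_cons_of_mem _ hc)
          rw [List.mem_cons] at hc2
          rcases hc2 with e | hu
          · exact absurd (e ▸ h1.1 c hc) (by omega)
          · exact hu
        · have hc1 := (h c).mpr (List.mem_cons_of_mem _ hc)
          rw [List.mem_cons] at hc1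
          rcases hc1 with e | hu
          · exact absurd (e ▸ h2.1 c hc) (by omega)
          · exact hu
      rw [ht]

-- A's nested scan equals B's loop over the vertically matching rows
theorem pvChain (x y kw kh km start_y : Int) :
    ∀ l : List (Int × String),
      (∀ p ∈ l, PySem.List.pyGet? pvKeys p.1 = some p.2) →
      (∀ p ∈ l, ∀ c ∈ p.2.toList, String.ofList [c] ∉ (["__SPACE__", "__DEL__"] : List String)) →
      pvScanRows x y start_y kw kh km l =
        pvAltRows x y kw kh km ((l.filter (fun p =>
          decide (start_y + p.1 * (kh + km) ≤ y ∧ y < start_y + p.1 * (kh + km) + kh))).map (·.1)) := by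
  intro l
  induction l with
  | nil => intro _ _; rfl
  | cons p rest ih =>
    obtain ⟨j, row⟩ := p
    intro hget hspec
    have hg : PySem.List.pyGet? pvKeys j = some row := hget (j, row) (List.mem_cons_self ..)
    have hscan := pvScanKeys_eq_firstKey x y
      (PySem.Int.floordiv (240 - (PySem.Str.len row * (kw + km) - km)) 2)
      (start_y + j * (kh + km)) kw kh km row.toList
      (fun c hc => hspec (j, row) (List.mem_cons_self ..) c hc) 0
    have ihr := ih (fun q hq => hget q (List.mem_cons_of_mem _ hq))
      (fun q hq => hspec q (List.mem_cons_of_mem _ hq))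
    by_cases hv : start_y + j * (kh + km) ≤ y ∧ y < start_y + j * (kh + km) + kh
    · rw [List.filter_cons_of_pos (by simpa using hv)]
      simp only [pvScanRows, pvAltRows, List.map_cons, hg]
      have heq : pvScanKeys x y
          (PySem.Int.floordiv (240 - (PySem.Str.len row * (kw + km) - km)) 2)
          (start_y + j * (kh + km)) kw kh km (PySem.List.enumerate row.toList) =
          pvRowHit x kw km row := by
        rw [hscan, pvRowHit_eq]
        congr 1
        apply pvFirstKey_congr
        intro i
        constructor
        · rintro ⟨a, b, _, _⟩; exact ⟨a, b⟩
        · rintro ⟨a, b⟩; exact ⟨a, b, hv.1, hv.2⟩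
      rw [heq]
      cases hr : pvRowHit x kw km row with
      | some r => rfl
      | none => exact ihr
    · rw [List.filter_cons_of_neg (by simpa using hv)]
      simp only [pvScanRows]
      have hnone : pvScanKeys x y
          (PySem.Int.floordiv (240 - (PySem.Str.len row * (kw + km) - km)) 2)
          (start_y + j * (kh + km)) kw kh km (PySem.List.enumerate row.toList) = none := by
        rw [hscan, pvFirstKey_none]
        · rfl
        · intro k _ _ hPk
          exact hv ⟨hPk.2.2.1, hPk.2.2.2⟩
      rw [hnone]
      exact ihr

-- no key of the fixed layout is one of the (dead) special key names
theorem pvNoSpecial : ∀ p ∈ ([((0 : Int), "QWERTYUIOP"), (1, "ASDFGHJKL"), (2, "ZXCVBNM"),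
    (3, "__SPACE____DEL__")] : List (Int × String)),
    ∀ c ∈ p.2.toList, String.ofList [c] ∉ (["__SPACE__", "__DEL__"] : List String) := by
  intro p hp
  fin_cases hp
  · intro c hc
    rw [show "QWERTYUIOP".toList = ['Q','W','E','R','T','Y','U','I','O','P'] from by decide] at hc
    fin_cases hc <;> decide
  · intro c hc
    rw [show "ASDFGHJKL".toList = ['A','S','D','F','G','H','J','K','L'] from by decide] at hc
    fin_cases hc <;> decide
  · intro c hc
    rw [show "ZXCVBNM".toList = ['Z','X','C','V','B','N','M'] from by decide] at hc
    fin_cases hc <;> decide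
  · intro c hc
    rw [show "__SPACE____DEL__".toList =
      ['_','_','S','P','A','C','E','_','_','_','_','D','E','L','_','_'] from by decide] at hc
    fin_cases hc <;> decide

-- ===== VERDICT (by name: the statement is the Claim_ definition above) =====
set_option maxRecDepth 4096 in
theorem check_key_press_spec : Claim_equal_check_key_press := by
  unfold Claim_equal_check_key_press Spec_check_key_press
  intro x y key_positions key_size key_margin _
  simp only [check_key_press, check_key_press_alt]
  have hlen : PySem.List.len pvKeys = (4 : Int) := by decide
  have henum : PySem.List.enumerate pvKeys =
      [((0 : Int), "QWERTYUIOP"), (1, "ASDFGHJKL"), (2, "ZXCVBNM"), (3, "__SPACE____DEL__")] := by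
    decide
  rw [hlen, henum]
  rw [pvChain x y key_size.1 key_size.2 key_margin
    (320 - (4 * (key_size.2 + key_margin) - key_margin)) _ (by decide) pvNoSpecial]
  congr 1
  refine pvSortedExt _ _ ?_ (pvCellRange_pairwise _ _ _ _) ?_
  · refine List.Pairwise.sublist (List.Sublist.map _ List.filter_sublist)
      (?_ : (([((0 : Int), "QWERTYUIOP"), (1, "ASDFGHJKL"), (2, "ZXCVBNM"),
        (3, "__SPACE____DEL__")] : List (Int × String)).map (·.1)).Pairwise (· < ·))
    decide
  · intro a
    rw [pvCellRange_mem]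
    constructor
    · intro ha
      simp only [List.mem_map, List.mem_filter] at ha
      obtain ⟨p, ⟨hpm, hpc⟩, rfl⟩ := ha
      fin_cases hpm <;> simp only [decide_eq_true_eq] at hpc <;> simp <;> omega
    · intro ha
      obtain ⟨h0, h4, hl, hr⟩ := ha
      interval_cases a <;> simp [List.mem_map, List.mem_filter] <;> omega
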